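-- pv_equiv track=rewrite | github.com/YanaUmantseva/Homework | marks/oleg marks.py | max_fives
-- ===== SOURCE A (Python) =====
-- def max_fives(n, marks):
--     max_fives = 0
--     actual_fives = 0
--     segment_valid = False
--
--     for mark in marks:
--         if mark == 2 or mark == 3:
--
--             if segment_valid:
--                 max_fives = max(max_fives, actual_fives)
--                 segment_valid = False
--             actual_fives = 0
--         else:
--             if mark == 5:
--                 actual_fives += 1
--                 segment_valid = True
--
--
--     if segment_valid:
--         max_fives = max(max_fives, actual_fives)
--
--     return max_fives if max_fives > 0 else -1
-- ===== SOURCE B (Python) =====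
-- def max_fives(n, marks):
--     segments = []
--     current = []
--     for mark in marks:
--         if mark == 2 or mark == 3:
--             segments.append(current)
--             current = []
--         else:
--             current.append(mark)
--     segments.append(current)
--     best = max((seg.count(5) for seg in segments), default=0)
--     return best if best > 0 else -1
-- ===== Notes on version B (the rewrite author's own statement) =====
-- stated objective: simpler
-- what changed: Replaces the one-pass flag machine (max/actual/segment_valid state) with a build-then-scan decomposition: split marks into segments at 2/3 delimiters, then take the max of seg.count(5) over the segments.
import Mathlib
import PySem

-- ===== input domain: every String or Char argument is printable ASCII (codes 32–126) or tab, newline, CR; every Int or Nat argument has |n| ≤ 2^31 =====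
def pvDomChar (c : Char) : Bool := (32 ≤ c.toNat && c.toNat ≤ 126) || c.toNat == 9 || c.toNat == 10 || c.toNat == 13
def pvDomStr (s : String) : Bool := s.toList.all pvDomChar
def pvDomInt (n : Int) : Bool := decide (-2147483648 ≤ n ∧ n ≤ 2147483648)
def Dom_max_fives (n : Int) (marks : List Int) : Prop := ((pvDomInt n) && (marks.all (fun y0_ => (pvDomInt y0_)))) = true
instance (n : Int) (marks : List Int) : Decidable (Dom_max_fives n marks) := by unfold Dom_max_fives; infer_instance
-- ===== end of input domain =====

-- B replaces A's one-pass flag machine by a build-then-scan decomposition (split marks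
-- into segments at 2/3 delimiters, then max of per-segment five-counts); objective: simpler.

-- ===== PORT A =====
-- loop body of A's for-loop over marks; state = (max_fives, actual_fives, segment_valid)
def stepA (st : Int × Int × Bool) (mark : Int) : Int × Int × Bool :=
  if mark == 2 || mark == 3 then
    (if st.2.2 then max st.1 st.2.1 else st.1, 0, false)
  else if mark == 5 then (st.1, st.2.1 + 1, true) else st

def max_fives (n : Int) (marks : List Int) : Int :=
  let s := marks.foldl stepA (0, 0, false)
  let m := if s.2.2 then max s.1 s.2.1 else s.1
  if m > 0 then m else -1

-- ===== PORT B =====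
-- loop body of B's for-loop over marks; state = (segments, current)
def stepB (st : List (List Int) × List Int) (mark : Int) : List (List Int) × List Int :=
  if mark == 2 || mark == 3 then (st.1 ++ [st.2], ([] : List Int))
  else (st.1, st.2 ++ [mark])

def max_fives_alt (n : Int) (marks : List Int) : Int :=
  let st := marks.foldl stepB ([], [])
  let segments := st.1 ++ [st.2]
  let best := (PySem.List.max? (segments.map (fun seg => (PySem.List.count seg 5 : Int))) (fun x => x)).getD 0
  if best > 0 then best else -1

-- ===== PRECONDITION & SPEC =====
def Spec_max_fives (n : Int) (marks : List Int) (out : Int) : Prop := out = max_fives_alt n marks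
instance (n : Int) (marks : List Int) (out : Int) : Decidable (Spec_max_fives n marks out) := by unfold Spec_max_fives; infer_instance

-- ===== CLAIM (what is proved, stated in full; the proofs are below) =====
def Claim_equal_max_fives : Prop := ∀ (n : Int) (marks : List Int), Dom_max_fives n marks → Spec_max_fives n marks (max_fives n marks)

-- ===== LEMMAS AND PROOFS =====

-- per-segment five-counts of a mark list: (count of the first segment, counts of the rest)
def countsP : List Int → Int × List Int
  | [] => (0, [])
  | x :: xs =>
    let p := countsP xs
    if x == 2 || x == 3 then (0, p.1 :: p.2)
    else ((if x == 5 then p.1 + 1 else p.1), p.2)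

def c5 (seg : List Int) : Int := (PySem.List.count seg 5 : Int)

-- A's final flush of the loop state
def flushA (s : Int × Int × Bool) : Int := if s.2.2 then max s.1 s.2.1 else s.1

theorem foldl_max_max (l : List Int) : ∀ a b : Int, l.foldl max (max a b) = max a (l.foldl max b) := by
  induction l with
  | nil => intro a b; simp
  | cons x t ih =>
    intro a b
    simp only [List.foldl_cons]
    rw [max_assoc, ih]

-- A's loop (including the final flush) is the running max over the segment counts
theorem A_loop_eq (xs : List Int) : ∀ m a : Int, 0 ≤ m → 0 ≤ a →
    flushA (xs.foldl stepA (m, a, decide (0 < a)))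
    = ((a + (countsP xs).1) :: (countsP xs).2).foldl max m := by
  induction xs with
  | nil =>
    intro m a hm ha
    simp only [List.foldl_nil, countsP, List.foldl_cons, List.foldl_nil, add_zero, flushA]
    by_cases h : 0 < a
    · simp [h]
    · have ha0 : a = 0 := by omega
      subst ha0
      simp [max_eq_left hm]
  | cons x t ih =>
    intro m a hm ha
    by_cases hd : (x == 2 || x == 3) = true
    · have h1 : stepA (m, a, decide (0 < a)) x = (max m a, 0, decide ((0:Int) < 0)) := by
        simp only [stepA, hd, if_pos]
        by_cases h : 0 < a
        · simp [h]
        · have ha0 : a = 0 := by omega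
          subst ha0
          simp [max_eq_left hm]
      simp only [List.foldl_cons, h1]
      rw [ih (max m a) 0 (le_trans hm (le_max_left _ _)) le_rfl]
      simp only [countsP, hd, if_pos, List.foldl_cons, add_zero, zero_add]
    · by_cases h5 : (x == 5) = true
      · have hdec : decide (0 < a + 1) = true := by rw [decide_eq_true_iff]; omega
        have h1 : stepA (m, a, decide (0 < a)) x = (m, a + 1, decide (0 < a + 1)) := by
          unfold stepA
          rw [if_neg hd, if_pos h5, hdec]
        simp only [List.foldl_cons, h1]
        rw [ih m (a + 1) hm (show (0:Int) ≤ a + 1 by omega)]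
        simp only [countsP, hd, h5, if_neg, if_pos, Bool.false_eq_true, not_false_iff]
        have : a + 1 + (countsP t).1 = a + ((countsP t).1 + 1) := by ring
        rw [this]
        simp [List.foldl_cons]
      · have h1 : stepA (m, a, decide (0 < a)) x = (m, a, decide (0 < a)) := by
          simp [stepA, hd, h5]
        simp only [List.foldl_cons, h1]
        rw [ih m a hm ha]
        simp only [countsP, hd, h5, Bool.false_eq_true, if_neg, not_false_iff]
        simp [List.foldl_cons]

-- B's segment-building loop yields exactly the countsP segment counts
theorem B_loop_eq (xs : List Int) : ∀ segs cur,
    (((xs.foldl stepB (segs, cur)).1 ++ [(xs.foldl stepB (segs, cur)).2]).map c5)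
    = segs.map c5 ++ ((c5 cur + (countsP xs).1) :: (countsP xs).2) := by
  induction xs with
  | nil =>
    intro segs cur
    simp [countsP]
  | cons x t ih =>
    intro segs cur
    by_cases hd : (x == 2 || x == 3) = true
    · have h1 : stepB (segs, cur) x = (segs ++ [cur], []) := by simp [stepB, hd]
      simp only [List.foldl_cons, h1]
      rw [ih (segs ++ [cur]) []]
      have hc : c5 ([] : List Int) = 0 := by simp [c5, PySem.List.count]
      simp only [countsP, hd, if_pos, List.map_append, List.map_cons, List.map_nil, hc,
        zero_add, add_zero, List.append_assoc, List.cons_append, List.nil_append]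
    · have h1 : stepB (segs, cur) x = (segs, cur ++ [x]) := by simp [stepB, hd]
      simp only [List.foldl_cons, h1]
      rw [ih segs (cur ++ [x])]
      have hc : c5 (cur ++ [x]) = c5 cur + (if (x == 5) = true then 1 else 0) := by
        by_cases h5 : (x == 5) = true
        · have : x = 5 := by simpa using h5
          subst this
          simp [c5, PySem.List.count, List.count_append]
        · have : ¬ x = 5 := by simpa using h5
          simp [c5, PySem.List.count, List.count_append, this, h5]
      simp only [countsP, hd, Bool.false_eq_true, if_neg, not_false_iff, hc]
      by_cases h5 : (x == 5) = true
      · simp only [h5, if_pos]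
        have : c5 cur + 1 + (countsP t).1 = c5 cur + ((countsP t).1 + 1) := by ring
        rw [this]
      · simp [h5]

theorem max_fives_spec : Claim_equal_max_fives := by
  intro n marks _
  unfold Spec_max_fives max_fives max_fives_alt
  have hA := A_loop_eq marks 0 0 le_rfl le_rfl
  have hB := B_loop_eq marks [] []
  have hc : c5 ([] : List Int) = 0 := by simp [c5, PySem.List.count]
  rw [hc, List.map_nil, List.nil_append] at hB
  simp only [zero_add] at hA hB
  have hdec : decide ((0:Int) < 0) = false := by decide
  rw [hdec] at hA
  simp only []
  -- rewrite B's map via hB, then evaluate max? on the cons list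
  have hmap : (((marks.foldl stepB ([], [])).1 ++ [(marks.foldl stepB ([], [])).2]).map
      (fun seg => (PySem.List.count seg 5 : Int))) = (countsP marks).1 :: (countsP marks).2 := by
    have : (fun seg => (PySem.List.count seg 5 : Int)) = c5 := rfl
    rw [this]; exact hB
  rw [hmap, PySem.List.max?_id_cons]
  simp only [Option.getD_some]
  -- rewrite A's flushed loop via hA
  rw [show (if (marks.foldl stepA (0, 0, false)).2.2 = true then
      max (marks.foldl stepA (0, 0, false)).1 (marks.foldl stepA (0, 0, false)).2.1
      else (marks.foldl stepA (0, 0, false)).1)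
      = flushA (marks.foldl stepA (0, 0, false)) from rfl, hA]
  have hfold : ((countsP marks).1 :: (countsP marks).2).foldl max 0
      = max 0 ((countsP marks).2.foldl max (countsP marks).1) := by
    simp only [List.foldl_cons]
    have : max (0:Int) (countsP marks).1 = max 0 (countsP marks).1 := rfl
    rw [show max (0:Int) (countsP marks).1 = max 0 (countsP marks).1 from rfl]
    exact foldl_max_max _ 0 (countsP marks).1
  rw [hfold]
  set M := (countsP marks).2.foldl max (countsP marks).1 with hM
  by_cases h : 0 < M
  · rw [max_eq_right (le_of_lt h)]
  · rw [max_eq_left (by omega)]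
    simp only [lt_irrefl]
    simp [h]
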